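-- pv_equiv track=rewrite | github.com/temnok/algorithm-practice | python/trie/find_prefix.py | has_prefix
-- ===== SOURCE A (Python) =====
-- def has_prefix(dict: list[str]) -> bool:
-- 	# raise NotImplementedError('TODO')
--
-- 	root = Node()
-- 	for word in dict:
-- 		cur = root
-- 		for i, char in enumerate(word):
-- 			next = cur.next.get(char)
--
-- 			if next is None:
-- 				next = Node()
-- 				cur.next[char] = next
-- 			else:
-- 				if next.end or i == len(word)-1:
-- 					return True
--
-- 			cur = next
--
-- 		cur.end = True
--
-- 	return False
--
-- class Node:
-- 	def __init__(self):
-- 		self.next = {}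
-- 		self.end = False
-- ===== SOURCE B (Python) =====
-- def has_prefix(dict: list[str]) -> bool:
-- 	# Hash-set re-implementation: store the distinct nonempty words, then test every
-- 	# proper prefix of every word for membership. Empty strings are inert, as in the
-- 	# trie version (it never walks an edge for them).
-- 	seen = set()
-- 	for w in dict:
-- 		if w:
-- 			if w in seen:
-- 				return True
-- 			seen.add(w)
-- 	for w in dict:
-- 		for k in range(1, len(w)):
-- 			if w[:k] in seen:
-- 				return True
-- 	return False
-- ===== Notes on version B (the rewrite author's own statement) =====
-- stated objective: idiomatic
-- what changed: Replaces the hand-built mutable trie with a hash set of the distinct nonempty words plus a proper-prefix membership scan (duplicates detected while building the set); empty strings stay inert exactly as in the trie.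
import Mathlib
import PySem

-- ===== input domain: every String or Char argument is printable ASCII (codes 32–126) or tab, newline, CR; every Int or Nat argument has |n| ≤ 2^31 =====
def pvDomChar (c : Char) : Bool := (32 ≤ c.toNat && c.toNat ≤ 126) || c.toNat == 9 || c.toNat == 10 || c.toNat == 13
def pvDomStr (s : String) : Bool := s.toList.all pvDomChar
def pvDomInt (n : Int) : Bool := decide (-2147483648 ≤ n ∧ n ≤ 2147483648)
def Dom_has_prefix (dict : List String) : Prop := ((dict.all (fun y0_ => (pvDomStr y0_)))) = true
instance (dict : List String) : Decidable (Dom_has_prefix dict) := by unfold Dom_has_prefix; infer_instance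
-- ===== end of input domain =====

-- B replaces A's hand-built mutable trie by a hash set of the distinct nonempty words plus a
-- proper-prefix membership scan (idiomatic; empty strings stay inert exactly as in A's trie).


-- ===== PORT A =====
-- A's trie of mutable Nodes is encoded by its observable state: `nodes` = the set of nonempty
-- paths (char-list prefixes) present in the trie, `ends` = the set of paths whose node has
-- `end = True`.  `cur` is the path of the current node; `cur.next.get(char) is None` is exactly
-- `¬ contains nodes (cur ++ [char])`, and `i == len(word)-1` is exactly `rest' = []`.
def goA (nodes ends : PySem.Set (List Char)) (cur : List Char) (rest : List Char) :
    Option (PySem.Set (List Char) × PySem.Set (List Char)) :=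
  match rest with
  | [] => some (nodes, PySem.Set.add ends cur)          -- cur.end = True
  | c :: rest' =>
    if PySem.Set.contains nodes (cur ++ [c]) then       -- next is not None
      if PySem.Set.contains ends (cur ++ [c]) || rest'.isEmpty then none   -- return True
      else goA nodes ends (cur ++ [c]) rest'
    else goA (PySem.Set.add nodes (cur ++ [c])) ends (cur ++ [c]) rest' -- create the node

def loopA : PySem.Set (List Char) → PySem.Set (List Char) → List String → Bool
  | _, _, [] => false
  | nodes, ends, w :: ws =>
    match goA nodes ends [] w.toList with
    | none => true
    | some (n, e) => loopA n e ws

def has_prefix (dict : List String) : Bool :=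
  loopA PySem.Set.empty PySem.Set.empty dict

-- ===== PORT B =====
-- first loop of Source B: build `seen`, returning none where the Python returns True (duplicate)
def buildSeen : PySem.Set String → List String → Option (PySem.Set String)
  | seen, [] => some seen
  | seen, w :: ws =>
    if w ≠ "" then                                      -- if w:
      if PySem.Set.contains seen w then none            -- return True
      else buildSeen (PySem.Set.add seen w) ws
    else buildSeen seen ws

-- second loop of Source B: any proper prefix of any word in `seen`?
def checkB (seen : PySem.Set String) : List String → Bool
  | [] => false
  | w :: ws =>
    if (PySem.List.pyRange 1 (PySem.Str.len w) 1).any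
        (fun k => PySem.Set.contains seen (PySem.Str.slice w none (some k))) then true
    else checkB seen ws

def has_prefix_alt (dict : List String) : Bool :=
  match buildSeen PySem.Set.empty dict with
  | none => true
  | some seen => checkB seen dict

-- ===== PRECONDITION & SPEC =====
def Spec_has_prefix (dict : List String) (out : Bool) : Prop := out = has_prefix_alt dict
instance (dict : List String) (out : Bool) : Decidable (Spec_has_prefix dict out) := by unfold Spec_has_prefix; infer_instance

-- ===== CLAIM (what is proved, stated in full; the proofs are below) =====
def Claim_equal_has_prefix : Prop := ∀ (dict : List String), Dom_has_prefix dict → Spec_has_prefix dict (has_prefix dict)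

-- ===== LEMMAS AND PROOFS =====

-- two words conflict: both nonempty and one is a prefix of the other
def confl (u v : List Char) : Prop := u ≠ [] ∧ v ≠ [] ∧ (u <+: v ∨ v <+: u)

-- the common specification: some word conflicts with a later word
def HasConfl : List String → Prop
  | [] => False
  | w :: ws => (∃ v ∈ ws, confl w.toList v.toList) ∨ HasConfl ws

-- ---------- A side ----------

-- trie-state invariant on nodes, parameterised by the inserted words L and the current path cur
def InvN (L : List (List Char)) (cur : List Char) (nodes : PySem.Set (List Char)) : Prop :=
  ∀ p, p ∈ nodes ↔ p ≠ [] ∧ ((∃ u ∈ L, p <+: u) ∨ p <+: cur)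

def InvE (L : List (List Char)) (ends : PySem.Set (List Char)) : Prop :=
  ∀ p, p ∈ ends ↔ p ∈ L


theorem invN_in (L : List (List Char)) (cur : List Char) (c : Char)
    (nodes : PySem.Set (List Char)) (h : InvN L cur nodes) (hmem : cur ++ [c] ∈ nodes) :
    InvN L (cur ++ [c]) nodes := by
  have hpath := (h _).mp hmem
  have hex : ∃ u ∈ L, cur ++ [c] <+: u := by
    rcases hpath.2 with hx | hx
    · exact hx
    · exact absurd hx.length_le (by simp)
  intro p
  rw [h p]
  constructor
  · rintro ⟨hne, hx | hx⟩
    · exact ⟨hne, Or.inl hx⟩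
    · exact ⟨hne, Or.inr (hx.trans (List.prefix_append cur [c]))⟩
  · rintro ⟨hne, hx | hx⟩
    · exact ⟨hne, Or.inl hx⟩
    · rcases List.prefix_concat_iff.mp hx with rfl | hx'
      · exact ⟨hne, Or.inl hex⟩
      · exact ⟨hne, Or.inr hx'⟩

theorem invN_add (L : List (List Char)) (cur : List Char) (c : Char)
    (nodes : PySem.Set (List Char)) (h : InvN L cur nodes) :
    InvN L (cur ++ [c]) (PySem.Set.add nodes (cur ++ [c])) := by
  intro p
  rw [PySem.Set.mem_add, h p]
  constructor
  · rintro (⟨hne, hx | hx⟩ | rfl)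
    · exact ⟨hne, Or.inl hx⟩
    · exact ⟨hne, Or.inr (hx.trans (List.prefix_append cur [c]))⟩
    · exact ⟨by simp, Or.inr List.prefix_rfl⟩
  · rintro ⟨hne, hx | hx⟩
    · exact Or.inl ⟨hne, Or.inl hx⟩
    · rcases List.prefix_concat_iff.mp hx with rfl | hx'
      · exact Or.inr rfl
      · exact Or.inl ⟨hne, Or.inr hx'⟩

theorem goA_none_iff (rest : List Char) : ∀ (cur : List Char) nodes ends L,
    InvN L cur nodes → InvE L ends →
    (goA nodes ends cur rest = none ↔
      (∃ u ∈ L, u <+: cur ++ rest ∧ cur.length < u.length) ∨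
      (rest ≠ [] ∧ ∃ u ∈ L, cur ++ rest <+: u)) := by
  induction rest with
  | nil =>
    intro cur nodes ends L hN hE
    simp only [goA, List.append_nil]
    constructor
    · intro h; exact absurd h (by simp)
    · rintro (⟨u, hu, hpre, hlen⟩ | ⟨hne, _⟩)
      · exact absurd hpre.length_le (by omega)
      · exact absurd rfl hne
  | cons c rest' ih =>
    intro cur nodes ends L hN hE
    have hcat : cur ++ c :: rest' = (cur ++ [c]) ++ rest' := by simp
    by_cases hmem : cur ++ [c] ∈ nodes
    · have hexu : ∃ u ∈ L, cur ++ [c] <+: u := by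
        rcases ((hN _).mp hmem).2 with hx | hx
        · exact hx
        · exact absurd hx.length_le (by simp)
      have hc1 : PySem.Set.contains nodes (cur ++ [c]) = true :=
        (PySem.Set.contains_iff nodes _).mpr hmem
      by_cases hstop : (cur ++ [c]) ∈ ends ∨ rest' = []
      · have hb : (PySem.Set.contains ends (cur ++ [c]) || rest'.isEmpty) = true := by
          rcases hstop with hs | hs
          · rw [(PySem.Set.contains_iff ends _).mpr hs]; rfl
          · simp [hs]
        simp only [goA, hc1, if_true, hb]
        constructor
        · intro _
          rcases hstop with hs | hs
          · refine Or.inl ⟨cur ++ [c], (hE _).mp hs, ?_, by simp⟩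
            rw [hcat]; exact List.prefix_append _ _
          · subst hs
            obtain ⟨u, hu, hpre⟩ := hexu
            exact Or.inr ⟨by simp, u, hu, by simpa using hpre⟩
        · intro _; trivial
      · rw [not_or] at hstop
        obtain ⟨hse, hre⟩ := hstop
        have hb : (PySem.Set.contains ends (cur ++ [c]) || rest'.isEmpty) = false := by
          have : PySem.Set.contains ends (cur ++ [c]) = false := by
            rcases h : PySem.Set.contains ends (cur ++ [c]) with _ | _
            · rfl
            · exact absurd ((PySem.Set.contains_iff ends _).mp h) hse
          rw [this]; simp [hre]
        have hnl : cur ++ [c] ∉ L := fun h => hse ((hE _).mpr h)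
        simp only [goA, hc1, if_true, hb, Bool.false_eq_true, if_false]
        rw [ih (cur ++ [c]) nodes ends L (invN_in L cur c nodes hN hmem) hE]
        constructor
        · rintro (⟨u, hu, hpre, hlen⟩ | ⟨_, u, hu, hpre⟩)
          · refine Or.inl ⟨u, hu, by rwa [hcat], by simp at hlen; omega⟩
          · exact Or.inr ⟨by simp, u, hu, by rwa [hcat]⟩
        · rintro (⟨u, hu, hpre, hlen⟩ | ⟨_, u, hu, hpre⟩)
          · rw [hcat] at hpre
            rcases Nat.lt_or_ge (cur ++ [c]).length u.length with hlt | hge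
            · exact Or.inl ⟨u, hu, hpre, hlt⟩
            · have hup : u <+: cur ++ [c] :=
                List.prefix_of_prefix_length_le hpre (List.prefix_append _ _) hge
              have : u = cur ++ [c] := hup.eq_of_length (by simp at hge ⊢; omega)
              exact absurd (this ▸ hu) hnl
          · exact Or.inr ⟨hre, u, hu, by rwa [hcat] at hpre⟩
    · have hc1 : PySem.Set.contains nodes (cur ++ [c]) = false := by
        rcases h : PySem.Set.contains nodes (cur ++ [c]) with _ | _
        · rfl
        · exact absurd ((PySem.Set.contains_iff nodes _).mp h) hmem
      simp only [goA, hc1, Bool.false_eq_true, if_false]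
      rw [ih (cur ++ [c]) (PySem.Set.add nodes (cur ++ [c])) ends L (invN_add L cur c nodes hN) hE]
      have hnopre : ∀ u ∈ L, ¬ (cur ++ [c]) <+: u := by
        intro u hu hup
        exact hmem ((hN _).mpr ⟨by simp, Or.inl ⟨u, hu, hup⟩⟩)
      constructor
      · rintro (⟨u, hu, hpre, hlen⟩ | ⟨_, u, hu, hpre⟩)
        · exact absurd (List.prefix_of_prefix_length_le (List.prefix_append _ _) hpre hlen.le)
            (hnopre u hu)
        · exact absurd ((List.prefix_append _ _).trans hpre) (hnopre u hu)
      · rintro (⟨u, hu, hpre, hlen⟩ | ⟨_, u, hu, hpre⟩)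
        · rw [hcat] at hpre
          have : (cur ++ [c]).length ≤ u.length := by simp at hlen ⊢; omega
          exact absurd (List.prefix_of_prefix_length_le (List.prefix_append _ _) hpre this)
            (hnopre u hu)
        · rw [hcat] at hpre
          exact absurd ((List.prefix_append _ _).trans hpre) (hnopre u hu)

theorem goA_some_inv (rest : List Char) : ∀ (cur : List Char) nodes ends L n e,
    InvN L cur nodes → InvE L ends →
    goA nodes ends cur rest = some (n, e) →
    InvN L (cur ++ rest) n ∧ InvE ((cur ++ rest) :: L) e := by
  induction rest with
  | nil =>
    intro cur nodes ends L n e hN hE h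
    simp only [goA, Option.some.injEq, Prod.mk.injEq] at h
    obtain ⟨rfl, rfl⟩ := h
    refine ⟨by simpa using hN, ?_⟩
    intro p
    rw [List.append_nil, PySem.Set.mem_add, hE p, List.mem_cons]
    tauto
  | cons c rest' ih =>
    intro cur nodes ends L n e hN hE h
    rw [show cur ++ c :: rest' = (cur ++ [c]) ++ rest' by simp]
    by_cases hmem : cur ++ [c] ∈ nodes
    · have hc1 : PySem.Set.contains nodes (cur ++ [c]) = true :=
        (PySem.Set.contains_iff _ _).mpr hmem
      rw [goA, if_pos hc1] at h
      by_cases hstop : (PySem.Set.contains ends (cur ++ [c]) || rest'.isEmpty) = true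
      · rw [if_pos hstop] at h; exact absurd h (by simp)
      · rw [if_neg hstop] at h
        exact ih (cur ++ [c]) nodes ends L n e (invN_in L cur c nodes hN hmem) hE h
    · have hc1 : ¬ PySem.Set.contains nodes (cur ++ [c]) = true := by
        intro hx; exact hmem ((PySem.Set.contains_iff _ _).mp hx)
      rw [goA, if_neg hc1] at h
      exact ih (cur ++ [c]) _ ends L n e (invN_add L cur c nodes hN) hE h

-- conflicts of the words ws with the already inserted words L, in insertion order
def HCW : List (List Char) → List String → Prop
  | _, [] => False
  | L, w :: ws => (∃ u ∈ L, confl u w.toList) ∨ HCW (w.toList :: L) ws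

theorem loopA_iff (ws : List String) : ∀ nodes ends L,
    InvN L [] nodes → InvE L ends →
    (loopA nodes ends ws = true ↔ HCW L ws) := by
  induction ws with
  | nil => intro nodes ends L hN hE; simp [loopA, HCW]
  | cons w ws ih =>
    intro nodes ends L hN hE
    have hiff := goA_none_iff w.toList [] nodes ends L hN hE
    simp only [List.nil_append, List.length_nil] at hiff
    cases hg : goA nodes ends [] w.toList with
    | none =>
      have hconf : ∃ u ∈ L, confl u w.toList := by
        rcases hiff.mp hg with ⟨u, hu, hpre, hlen⟩ | ⟨hne, u, hu, hpre⟩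
        · refine ⟨u, hu, ?_, ?_, Or.inl hpre⟩
          · intro hx; rw [hx] at hlen; simp at hlen
          · intro hx; rw [hx] at hpre
            rw [List.prefix_nil.mp hpre] at hlen; simp at hlen
        · refine ⟨u, hu, ?_, hne, Or.inr hpre⟩
          intro hx; rw [hx] at hpre
          exact hne (List.prefix_nil.mp hpre)
      simp only [loopA, hg]
      exact iff_of_true trivial (Or.inl hconf)
    | some pr =>
      obtain ⟨n, e⟩ := pr
      have hinv := goA_some_inv w.toList [] nodes ends L n e hN hE hg
      simp only [List.nil_append] at hinv
      have hN2 : InvN (w.toList :: L) [] n := by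
        intro p
        rw [hinv.1 p]
        constructor
        · rintro ⟨hne, hx | hx⟩
          · obtain ⟨u, hu, hp⟩ := hx
            exact ⟨hne, Or.inl ⟨u, List.mem_cons_of_mem _ hu, hp⟩⟩
          · exact ⟨hne, Or.inl ⟨w.toList, by simp, hx⟩⟩
        · rintro ⟨hne, hx | hx⟩
          · obtain ⟨u, hu, hp⟩ := hx
            rcases List.mem_cons.mp hu with rfl | hu'
            · exact ⟨hne, Or.inr hp⟩
            · exact ⟨hne, Or.inl ⟨u, hu', hp⟩⟩
          · exact absurd (List.prefix_nil.mp hx) hne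
      have hnc : ¬ ∃ u ∈ L, confl u w.toList := by
        rintro ⟨u, hu, hc⟩
        have hnone : goA nodes ends [] w.toList = none := by
          apply hiff.mpr
          rcases hc.2.2 with hp | hp
          · refine Or.inl ⟨u, hu, hp, ?_⟩
            cases u with
            | nil => exact absurd rfl hc.1
            | cons a t => simp
          · exact Or.inr ⟨hc.2.1, u, hu, hp⟩
        rw [hg] at hnone; exact absurd hnone (by simp)
      simp only [loopA, hg]
      refine (ih n e (w.toList :: L) hN2 hinv.2).trans ?_
      exact ⟨fun h => Or.inr h, fun h => h.resolve_left hnc⟩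

theorem HCW_iff (ws : List String) : ∀ L,
    HCW L ws ↔ (∃ w ∈ ws, ∃ u ∈ L, confl u w.toList) ∨ HasConfl ws := by
  induction ws with
  | nil => intro L; simp [HCW, HasConfl]
  | cons w ws ih =>
    intro L
    show ((∃ u ∈ L, confl u w.toList) ∨ HCW (w.toList :: L) ws) ↔
      _ ∨ ((∃ v ∈ ws, confl w.toList v.toList) ∨ HasConfl ws)
    rw [ih (w.toList :: L)]
    constructor
    · rintro (h | ⟨v, hv, u, hu, hc⟩ | h)
      · exact Or.inl ⟨w, by simp, h⟩
      · rcases List.mem_cons.mp hu with rfl | hu'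
        · exact Or.inr (Or.inl ⟨v, hv, hc⟩)
        · exact Or.inl ⟨v, List.mem_cons_of_mem _ hv, u, hu', hc⟩
      · exact Or.inr (Or.inr h)
    · rintro (⟨v, hv, u, hu, hc⟩ | ⟨v, hv, hc⟩ | h)
      · rcases List.mem_cons.mp hv with rfl | hv'
        · exact Or.inl ⟨u, hu, hc⟩
        · exact Or.inr (Or.inl ⟨v, hv', u, List.mem_cons_of_mem _ hu, hc⟩)
      · exact Or.inr (Or.inl ⟨v, hv, w.toList, by simp, hc⟩)
      · exact Or.inr (Or.inr h)

theorem hasprefix_iff (dict : List String) : has_prefix dict = true ↔ HasConfl dict := by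
  have h0 : InvN [] [] PySem.Set.empty := by
    intro p
    constructor
    · intro hp; simp [PySem.Set.empty] at hp
    · rintro ⟨hne, hx | hx⟩
      · obtain ⟨u, hu, -⟩ := hx; simp at hu
      · exact absurd (List.prefix_nil.mp hx) hne
  have h0' : InvE [] PySem.Set.empty := by
    intro p
    constructor
    · intro hp; simp [PySem.Set.empty] at hp
    · intro hp; simp at hp
  rw [has_prefix, loopA_iff dict _ _ [] h0 h0', HCW_iff dict []]
  simp

-- ---------- B side ----------

-- a nonempty word occurring twice
def Dup (ws : List String) : Prop := ∃ w, w ≠ "" ∧ 2 ≤ ws.count w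

-- a word having a proper nonempty prefix that is also a word
def PP (ws : List String) : Prop :=
  ∃ w ∈ ws, ∃ u ∈ ws, u ≠ "" ∧ u.toList <+: w.toList ∧ u.toList.length < w.toList.length

theorem slice_toList (w : String) (k : Nat) :
    (PySem.Str.slice w none (some (k : Int))).toList = w.toList.take k := by
  simp [PySem.Str.slice, PySem.List.slice_to_natCast]

theorem buildSeen_some (ws : List String) : ∀ s t, buildSeen s ws = some t →
    ∀ p, p ∈ t ↔ p ∈ s ∨ (p ∈ ws ∧ p ≠ "") := by
  induction ws with
  | nil =>
    intro s t h p
    simp only [buildSeen, Option.some.injEq] at h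
    subst h
    simp
  | cons w ws ih =>
    intro s t h p
    by_cases hw : w ≠ ""
    · simp only [buildSeen, if_pos hw] at h
      by_cases hc : PySem.Set.contains s w = true
      · rw [if_pos hc] at h; exact absurd h (by simp)
      · rw [if_neg hc] at h
        rw [ih _ _ h p, PySem.Set.mem_add]
        constructor
        · rintro ((hp | rfl) | ⟨hp, hne⟩)
          · exact Or.inl hp
          · exact Or.inr ⟨by simp, hw⟩
          · exact Or.inr ⟨List.mem_cons_of_mem _ hp, hne⟩
        · rintro (hp | ⟨hp, hne⟩)
          · exact Or.inl (Or.inl hp)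
          · rcases List.mem_cons.mp hp with rfl | hp'
            · exact Or.inl (Or.inr rfl)
            · exact Or.inr ⟨hp', hne⟩
    · have hww : w = "" := not_ne_iff.mp hw
      simp only [buildSeen, if_neg hw] at h
      rw [ih _ _ h p]
      subst hww
      constructor
      · rintro (hp | ⟨hp, hne⟩)
        · exact Or.inl hp
        · exact Or.inr ⟨List.mem_cons_of_mem _ hp, hne⟩
      · rintro (hp | ⟨hp, hne⟩)
        · exact Or.inl hp
        · rcases List.mem_cons.mp hp with rfl | hp'
          · exact absurd rfl hne
          · exact Or.inr ⟨hp', hne⟩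

theorem buildSeen_none (ws : List String) : ∀ s : PySem.Set String, (∀ p ∈ s, p ≠ "") →
    (buildSeen s ws = none ↔ ∃ w, w ≠ "" ∧ ((w ∈ s ∧ w ∈ ws) ∨ 2 ≤ ws.count w)) := by
  induction ws with
  | nil =>
    intro s hs
    simp [buildSeen]
  | cons w ws ih =>
    intro s hs
    by_cases hw : w ≠ ""
    · simp only [buildSeen, if_pos hw]
      by_cases hc : PySem.Set.contains s w = true
      · rw [if_pos hc]
        have hmem : w ∈ s := (PySem.Set.contains_iff _ _).mp hc
        exact iff_of_true rfl ⟨w, hw, Or.inl ⟨hmem, by simp⟩⟩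
      · rw [if_neg hc]
        have hwm : w ∉ s := fun hx => hc ((PySem.Set.contains_iff _ _).mpr hx)
        have hs' : ∀ p ∈ PySem.Set.add s w, p ≠ "" := by
          intro p hp
          rcases (PySem.Set.mem_add _ _ _).mp hp with hp' | rfl
          · exact hs p hp'
          · exact hw
        rw [ih (PySem.Set.add s w) hs']
        constructor
        · rintro ⟨x, hx, ⟨hxs, hxw⟩ | hcnt⟩
          · rcases (PySem.Set.mem_add _ _ _).mp hxs with hx' | rfl
            · exact ⟨x, hx, Or.inl ⟨hx', List.mem_cons_of_mem _ hxw⟩⟩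
            · refine ⟨x, hx, Or.inr ?_⟩
              rw [List.count_cons_self]
              have := List.count_pos_iff.mpr hxw
              omega
          · refine ⟨x, hx, Or.inr ?_⟩
            rw [List.count_cons]
            split <;> omega
        · rintro ⟨x, hx, ⟨hxs, hxw⟩ | hcnt⟩
          · rcases List.mem_cons.mp hxw with rfl | hxw'
            · exact absurd hxs hwm
            · exact ⟨x, hx, Or.inl ⟨(PySem.Set.mem_add _ _ _).mpr (Or.inl hxs), hxw'⟩⟩
          · by_cases hxw : x = w
            · subst hxw
              rw [List.count_cons_self] at hcnt
              have hmem' : x ∈ ws := List.count_pos_iff.mp (by omega)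
              exact ⟨x, hx, Or.inl ⟨(PySem.Set.mem_add _ _ _).mpr (Or.inr rfl), hmem'⟩⟩
            · refine ⟨x, hx, Or.inr ?_⟩
              rw [List.count_cons] at hcnt
              have hbe : (w == x) = false := beq_eq_false_iff_ne.mpr (Ne.symm hxw)
              rw [hbe] at hcnt; simpa using hcnt
    · have hww : w = "" := not_ne_iff.mp hw
      simp only [buildSeen, if_neg hw]
      rw [ih s hs]
      subst hww
      constructor
      · rintro ⟨x, hx, ⟨hxs, hxw⟩ | hcnt⟩
        · exact ⟨x, hx, Or.inl ⟨hxs, List.mem_cons_of_mem _ hxw⟩⟩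
        · refine ⟨x, hx, Or.inr ?_⟩
          rw [List.count_cons]
          split <;> omega
      · rintro ⟨x, hx, ⟨hxs, hxw⟩ | hcnt⟩
        · rcases List.mem_cons.mp hxw with rfl | hxw'
          · exact absurd rfl hx
          · exact ⟨x, hx, Or.inl ⟨hxs, hxw'⟩⟩
        · refine ⟨x, hx, Or.inr ?_⟩
          rw [List.count_cons] at hcnt
          have hbe : (("" : String) == x) = false := beq_eq_false_iff_ne.mpr (Ne.symm hx)
          rw [hbe] at hcnt; simpa using hcnt

theorem checkB_iff (ws : List String) : ∀ seen,
    (checkB seen ws = true ↔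
      ∃ w ∈ ws, ∃ k : Nat, 1 ≤ k ∧ k < w.toList.length ∧
        (PySem.Str.slice w none (some (k : Int))) ∈ seen) := by
  induction ws with
  | nil => intro seen; simp [checkB]
  | cons w ws ih =>
    intro seen
    simp only [checkB]
    have hcond : ((PySem.List.pyRange 1 (PySem.Str.len w) 1).any
        (fun k => PySem.Set.contains seen (PySem.Str.slice w none (some k))) = true) ↔
        (∃ k : Nat, 1 ≤ k ∧ k < w.toList.length ∧
          (PySem.Str.slice w none (some (k : Int))) ∈ seen) := by
      rw [List.any_eq_true]
      constructor
      · rintro ⟨k, hk, hcont⟩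
        rw [PySem.List.mem_pyRange_one, PySem.Str.len_eq] at hk
        refine ⟨k.toNat, by omega, by omega, ?_⟩
        have hkk : ((k.toNat : Int)) = k := Int.toNat_of_nonneg (by omega)
        rw [hkk]
        exact (PySem.Set.contains_iff _ _).mp hcont
      · rintro ⟨k, hk1, hk2, hmem⟩
        refine ⟨(k : Int), ?_, (PySem.Set.contains_iff _ _).mpr hmem⟩
        rw [PySem.List.mem_pyRange_one, PySem.Str.len_eq]
        omega
    by_cases hcb : ((PySem.List.pyRange 1 (PySem.Str.len w) 1).any
        (fun k => PySem.Set.contains seen (PySem.Str.slice w none (some k))) = true)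
    · rw [if_pos hcb]
      refine iff_of_true rfl ?_
      obtain ⟨k, hk1, hk2, hm⟩ := hcond.mp hcb
      exact ⟨w, by simp, k, hk1, hk2, hm⟩
    · rw [if_neg hcb, ih seen]
      constructor
      · rintro ⟨v, hv, hk⟩
        exact ⟨v, List.mem_cons_of_mem _ hv, hk⟩
      · rintro ⟨v, hv, hk⟩
        rcases List.mem_cons.mp hv with rfl | hv'
        · exact absurd (hcond.mpr hk) hcb
        · exact ⟨v, hv', hk⟩

theorem dup_hasConfl (ws : List String) : Dup ws → HasConfl ws := by
  induction ws with
  | nil => rintro ⟨w, hw, hcnt⟩; simp at hcnt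
  | cons w ws ih =>
    rintro ⟨x, hx, hcnt⟩
    by_cases hxw : x = w
    · subst hxw
      rw [List.count_cons_self] at hcnt
      have hmem : x ∈ ws := List.count_pos_iff.mp (by omega)
      have hne : x.toList ≠ [] := fun h => hx (String.toList_eq_nil_iff.mp h)
      exact Or.inl ⟨x, hmem, hne, hne, Or.inl List.prefix_rfl⟩
    · refine Or.inr (ih ⟨x, hx, ?_⟩)
      rw [List.count_cons] at hcnt
      have hbe : (w == x) = false := beq_eq_false_iff_ne.mpr (Ne.symm hxw)
      rw [hbe] at hcnt; simpa using hcnt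

theorem pp_hasConfl (ws : List String) : PP ws → HasConfl ws := by
  induction ws with
  | nil => rintro ⟨w, hw, -⟩; simp at hw
  | cons a ws ih =>
    rintro ⟨w, hw, u, hu, hune, hpre, hlen⟩
    have huv : u ≠ w := by
      intro h; subst h; exact lt_irrefl _ hlen
    have hwne : w.toList ≠ [] := by
      intro h; rw [h] at hlen; simp at hlen
    have hul : u.toList ≠ [] := fun h => hune (String.toList_eq_nil_iff.mp h)
    rcases List.mem_cons.mp hw with rfl | hw'
    · have hu' : u ∈ ws := by
        rcases List.mem_cons.mp hu with rfl | h
        · exact absurd rfl huv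
        · exact h
      exact Or.inl ⟨u, hu', hwne, hul, Or.inr hpre⟩
    · rcases List.mem_cons.mp hu with rfl | hu'
      · exact Or.inl ⟨w, hw', hul, hwne, Or.inl hpre⟩
      · exact Or.inr (ih ⟨w, hw', u, hu', hune, hpre, hlen⟩)

theorem hasConfl_dup_or_pp (ws : List String) : HasConfl ws → Dup ws ∨ PP ws := by
  induction ws with
  | nil => intro h; exact h.elim
  | cons w ws ih =>
    rintro (⟨v, hv, hne1, hne2, hp⟩ | h)
    · by_cases heq : w.toList = v.toList
      · have hwv : w = v := String.toList_inj.mp heq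
        subst hwv
        have hwne : w ≠ "" := fun h => hne1 (String.toList_eq_nil_iff.mpr h)
        refine Or.inl ⟨w, hwne, ?_⟩
        rw [List.count_cons_self]
        have := List.count_pos_iff.mpr hv
        omega
      · right
        rcases hp with hp | hp
        · have hlt : w.toList.length < v.toList.length :=
            lt_of_le_of_ne hp.length_le (fun h => heq (hp.eq_of_length h))
          exact ⟨v, List.mem_cons_of_mem _ hv, w, by simp,
            fun h => hne1 (String.toList_eq_nil_iff.mpr h), hp, hlt⟩
        · have hlt : v.toList.length < w.toList.length :=
            lt_of_le_of_ne hp.length_le (fun h => heq (hp.eq_of_length h).symm)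
          exact ⟨w, by simp, v, List.mem_cons_of_mem _ hv,
            fun h => hne2 (String.toList_eq_nil_iff.mpr h), hp, hlt⟩
    · rcases ih h with hd | hp
      · obtain ⟨x, hx, hc⟩ := hd
        refine Or.inl ⟨x, hx, ?_⟩
        rw [List.count_cons]
        split <;> omega
      · obtain ⟨a, ha, u, hu, h1, h2, h3⟩ := hp
        exact Or.inr ⟨a, List.mem_cons_of_mem _ ha, u, List.mem_cons_of_mem _ hu, h1, h2, h3⟩

theorem hasprefix_alt_iff (dict : List String) : has_prefix_alt dict = true ↔ HasConfl dict := by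
  cases hb : buildSeen PySem.Set.empty dict with
  | none =>
    have hdup : Dup dict := by
      have h := (buildSeen_none dict PySem.Set.empty
        (by intro p hp; simp [PySem.Set.empty] at hp)).mp hb
      obtain ⟨x, hx, ⟨hxs, -⟩ | hcnt⟩ := h
      · simp [PySem.Set.empty] at hxs
      · exact ⟨x, hx, hcnt⟩
    simp only [has_prefix_alt, hb]
    exact iff_of_true trivial (dup_hasConfl dict hdup)
  | some seen =>
    have hseen : ∀ p, p ∈ seen ↔ p ∈ dict ∧ p ≠ "" := by
      intro p
      rw [buildSeen_some dict PySem.Set.empty seen hb p]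
      simp [PySem.Set.empty]
    have hndup : ¬ Dup dict := by
      rintro ⟨x, hx, hcnt⟩
      have hnone : buildSeen PySem.Set.empty dict = none :=
        (buildSeen_none dict PySem.Set.empty
          (by intro p hp; simp [PySem.Set.empty] at hp)).mpr ⟨x, hx, Or.inr hcnt⟩
      rw [hb] at hnone; exact absurd hnone (by simp)
    simp only [has_prefix_alt, hb]
    rw [checkB_iff dict seen]
    constructor
    · rintro ⟨w, hw, k, hk1, hk2, hmem⟩
      obtain ⟨hu_mem, hu_ne⟩ := (hseen _).mp hmem
      apply pp_hasConfl
      refine ⟨w, hw, _, hu_mem, hu_ne, ?_, ?_⟩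
      · rw [slice_toList]; exact List.take_prefix _ _
      · rw [slice_toList, List.length_take]; omega
    · intro h
      rcases hasConfl_dup_or_pp dict h with hd | hp
      · exact absurd hd hndup
      · obtain ⟨w, hw, u, hu, hune, hpre, hlen⟩ := hp
        have hul : u.toList ≠ [] := fun hh => hune (String.toList_eq_nil_iff.mp hh)
        refine ⟨w, hw, u.toList.length, ?_, hlen, ?_⟩
        · cases hult : u.toList with
          | nil => exact absurd hult hul
          | cons a t => simp
        · have hsl : PySem.Str.slice w none (some (u.toList.length : Int)) = u :=
            String.toList_inj.mp (by rw [slice_toList]; exact (List.prefix_iff_eq_take.mp hpre).symm)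
          rw [hsl]
          exact (hseen u).mpr ⟨hu, hune⟩

-- ===== VERDICT (by name: the statement is the Claim_ definition above) =====
theorem has_prefix_spec : Claim_equal_has_prefix := by
  intro dict _
  unfold Spec_has_prefix
  have hA := hasprefix_iff dict
  have hB := hasprefix_alt_iff dict
  cases ha : has_prefix dict <;> cases hb : has_prefix_alt dict <;> simp_all
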